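-- pv_equiv track=rewrite | github.com/castanev/Heat-waves-dynamics | Functions.py | duration_heat_waves
-- ===== SOURCE A (Python) =====
-- def duration_heat_waves(pos_hw, min_duration):
--     count = 1
--     duration_hw = []
--     pos_day1_hw = []
--     for i in range(len(pos_hw[:-1])):
--         if pos_hw[i] + 1 == pos_hw[i + 1]:
--             count += 1
--         else:
--             if count >= min_duration and len(pos_day1_hw) == 0:
--                 duration_hw.append(count)
--                 pos_day1_hw.append(pos_hw[i - count + 1])
--             elif count >= min_duration and abs((pos_day1_hw[-1] + duration_hw[-1]) - pos_hw[i - count + 1]) > 20: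
--                 duration_hw.append(count)
--                 pos_day1_hw.append(pos_hw[i - count + 1])
--             count = 1
--     return duration_hw, pos_day1_hw
-- ===== SOURCE B (Python) =====
-- def duration_heat_waves(pos_hw, min_duration):
--     # First pass: collect maximal runs of consecutive integers as (start_value, length);
--     # a run is recorded only when the next run begins, so the run containing the last
--     # element is never recorded (matching the reference behaviour).
--     runs = []
--     cur = None
--     for v in pos_hw:
--         if cur is not None and cur[0] + cur[1] == v:
--             cur = (cur[0], cur[1] + 1)
--         else:
--             if cur is not None:
--                 runs.append(cur)
--             cur = (v, 1)
--     # Second pass: keep runs that are long enough and far enough from the last kept one.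
--     duration_hw = []
--     pos_day1_hw = []
--     for start, length in runs:
--         if length >= min_duration and (
--             not pos_day1_hw
--             or abs((pos_day1_hw[-1] + duration_hw[-1]) - start) > 20
--         ):
--             duration_hw.append(length)
--             pos_day1_hw.append(start)
--     return duration_hw, pos_day1_hw
-- ===== Notes on version B (the rewrite author's own statement) =====
-- stated objective: alternative
-- what changed: A's single index-arithmetic loop (counter plus pos_hw[i-count+1] back-indexing over range(len(pos_hw[:-1]))) is replaced by two passes: first decompose pos_hw into runs of consecutive integers as (start_value, length) pairs (never recording the trailing run, as A never finalizes it), then filter that run list by minimum length and >20 spacing from the last kept run.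
import Mathlib
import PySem

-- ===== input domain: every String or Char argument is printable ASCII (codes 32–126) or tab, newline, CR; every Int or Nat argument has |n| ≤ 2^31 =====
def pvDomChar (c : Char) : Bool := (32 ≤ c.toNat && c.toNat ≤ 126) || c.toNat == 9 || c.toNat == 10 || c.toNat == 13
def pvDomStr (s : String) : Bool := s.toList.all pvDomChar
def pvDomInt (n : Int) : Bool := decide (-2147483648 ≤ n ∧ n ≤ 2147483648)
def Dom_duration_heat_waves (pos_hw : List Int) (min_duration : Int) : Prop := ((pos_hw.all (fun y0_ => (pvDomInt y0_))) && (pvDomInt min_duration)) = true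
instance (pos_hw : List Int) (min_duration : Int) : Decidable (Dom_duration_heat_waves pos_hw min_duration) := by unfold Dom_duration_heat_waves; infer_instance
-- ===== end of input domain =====

-- B replaces A's single index-arithmetic loop by a run-decomposition pass followed by a
-- filtering pass over the runs (objective: simpler decomposition, same cost).

-- ===== PORT A =====
-- loop body of A: compare pos_hw[i] with pos_hw[i+1]; on a break, maybe record the run and reset count
def hwStepA (pos_hw : List Int) (min_duration : Int)
    (st : Int × List Int × List Int) (i : Int) : Int × List Int × List Int :=
  let count := st.1
  let dur := st.2.1
  let p1 := st.2.2
  if PySem.List.pyGetD pos_hw i 0 + 1 = PySem.List.pyGetD pos_hw (i + 1) 0 then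
    (count + 1, dur, p1)
  else
    let st2 :=
      if count ≥ min_duration ∧ p1.length = 0 then
        (dur ++ [count], p1 ++ [PySem.List.pyGetD pos_hw (i - count + 1) 0])
      else if count ≥ min_duration ∧
          |(PySem.List.pyGetD p1 (-1) 0 + PySem.List.pyGetD dur (-1) 0)
            - PySem.List.pyGetD pos_hw (i - count + 1) 0| > 20 then
        (dur ++ [count], p1 ++ [PySem.List.pyGetD pos_hw (i - count + 1) 0])
      else (dur, p1)
    (1, st2)

-- literal transliteration of A: fold over range(len(pos_hw[:-1])) with state (count, duration_hw, pos_day1_hw)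
def duration_heat_waves (pos_hw : List Int) (min_duration : Int) : List Int × List Int :=
  let st :=
    (PySem.List.pyRange 0 ((PySem.List.slice pos_hw none (some (-1))).length : Int) 1).foldl
      (hwStepA pos_hw min_duration) (1, ([], []))
  (st.2.1, st.2.2)

-- ===== PORT B =====
-- first-pass body of B: extend the current run or record it and start a new one
def hwRunStep (st : List (Int × Int) × Option (Int × Int)) (v : Int) :
    List (Int × Int) × Option (Int × Int) :=
  match st.2 with
  | some c => if c.1 + c.2 = v then (st.1, some (c.1, c.2 + 1)) else (st.1 ++ [c], some (v, 1))
  | none => (st.1, some (v, 1))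

-- second-pass body of B: keep a run long enough and far enough from the last kept one
def hwAccept (min_duration : Int) (acc : List Int × List Int) (r : Int × Int) :
    List Int × List Int :=
  if r.2 ≥ min_duration ∧
      (acc.2 = [] ∨
        |(PySem.List.pyGetD acc.2 (-1) 0 + PySem.List.pyGetD acc.1 (-1) 0) - r.1| > 20) then
    (acc.1 ++ [r.2], acc.2 ++ [r.1])
  else acc

-- literal transliteration of B (Source B): build the run list (the trailing run is never
-- appended), then filter the runs
def duration_heat_waves_alt (pos_hw : List Int) (min_duration : Int) : List Int × List Int :=
  let p := pos_hw.foldl hwRunStep ([], none)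
  p.1.foldl (hwAccept min_duration) ([], [])

-- ===== PRECONDITION & SPEC =====
def Spec_duration_heat_waves (pos_hw : List Int) (min_duration : Int) (out : List Int × List Int) : Prop := out = duration_heat_waves_alt pos_hw min_duration
instance (pos_hw : List Int) (min_duration : Int) (out : List Int × List Int) : Decidable (Spec_duration_heat_waves pos_hw min_duration out) := by unfold Spec_duration_heat_waves; infer_instance

-- ===== CLAIM (what is proved, stated in full; the proofs are below) =====
def Claim_equal_duration_heat_waves : Prop := ∀ (pos_hw : List Int) (min_duration : Int), Dom_duration_heat_waves pos_hw min_duration → Spec_duration_heat_waves pos_hw min_duration (duration_heat_waves pos_hw min_duration)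

-- ===== LEMMAS AND PROOFS =====

-- the runs B's first pass records starting from current run (s, c): the trailing run is dropped
def hwRuns (s c : Int) : List Int → List (Int × Int)
  | [] => []
  | y :: ys => if s + c = y then hwRuns s (c + 1) ys else (s, c) :: hwRuns y 1 ys

-- value-level description of A's loop: the current run ends at value v with length c
def hwRec (m : Int) (v c : Int) (acc : List Int × List Int) : List Int → List Int × List Int
  | [] => acc
  | y :: ys =>
    if v + 1 = y then hwRec m y (c + 1) acc ys
    else hwRec m y 1 (hwAccept m acc (v - c + 1, c)) ys

-- B's first pass accumulates exactly hwRuns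
theorem hwRunStep_foldl (ys : List Int) : ∀ (rs : List (Int × Int)) (s c : Int),
    (ys.foldl hwRunStep (rs, some (s, c))).1 = rs ++ hwRuns s c ys := by
  induction ys with
  | nil => intro rs s c; simp [hwRuns]
  | cons y ys ih =>
    intro rs s c
    by_cases h : s + c = y
    · simp [List.foldl_cons, hwRunStep, h, hwRuns, ih]
    · simp [List.foldl_cons, hwRunStep, h, hwRuns, ih]

-- hwRec is the accept-fold over the runs
theorem hwRec_eq_foldl (m : Int) (ys : List Int) : ∀ (v c : Int) (acc : List Int × List Int),
    hwRec m v c acc ys = (hwRuns (v - c + 1) c ys).foldl (hwAccept m) acc := by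
  induction ys with
  | nil => intro v c acc; simp [hwRec, hwRuns]
  | cons y ys ih =>
    intro v c acc
    by_cases h : v + 1 = y
    · have hc : (v - c + 1) + c = y := by omega
      have hs : v - c + 1 = y - (c + 1) + 1 := by omega
      simp only [hwRec, hwRuns, if_pos h, if_pos hc, ih]
      rw [hs]
    · have hc : ¬ ((v - c + 1) + c = y) := by omega
      simp only [hwRec, hwRuns, if_neg h, if_neg hc, List.foldl_cons, ih]
      norm_num

-- on a run break, A's two-branch append equals B's single acceptance test
theorem hwStepA_break_eq_accept (m c : Int) (dur p1 : List Int) (s : Int) :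
    (if c ≥ m ∧ p1.length = 0 then
        (dur ++ [c], p1 ++ [s])
      else if c ≥ m ∧
          |(PySem.List.pyGetD p1 (-1) 0 + PySem.List.pyGetD dur (-1) 0) - s| > 20 then
        (dur ++ [c], p1 ++ [s])
      else (dur, p1))
      = hwAccept m (dur, p1) (s, c) := by
  unfold hwAccept
  by_cases h1 : c ≥ m
  · by_cases h2 : p1 = []
    · simp [h1, h2]
    · have : ¬ p1.length = 0 := by simpa [List.length_eq_zero_iff] using h2
      by_cases h3 : |(PySem.List.pyGetD p1 (-1) 0 + PySem.List.pyGetD dur (-1) 0) - s| > 20 <;>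
        simp [h1, h2, h3, this]
  · simp [h1]

-- A's indexed loop computes hwRec on the suffix after the current position
theorem hwStepA_foldl (xs : List Int) (m : Int) (ds : List Int) : ∀ (j : Nat) (c : Int)
    (dur p1 : List Int), j < xs.length → xs.drop (j + 1) = ds → 1 ≤ c → c ≤ (j : Int) + 1 →
    (∀ t : Nat, (t : Int) < c → xs.getD (j - t) 0 = xs.getD j 0 - t) →
    (let st := (PySem.List.pyRange (j : Int) ((xs.length - 1 : Nat) : Int) 1).foldl
        (hwStepA xs m) (c, dur, p1)
     (st.2.1, st.2.2)) = hwRec m (xs.getD j 0) c (dur, p1) ds := by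
  induction ds with
  | nil =>
    intro j c dur p1 hj hd hc1 hc2 _
    have hj' : j = xs.length - 1 := by
      have := List.drop_eq_nil_iff.mp hd; omega
    have hr : PySem.List.pyRange (j : Int) ((xs.length - 1 : Nat) : Int) 1 = [] := by
      subst hj'; simp [PySem.List.pyRange]
    simp [hr, hwRec]
  | cons y ds ih =>
    intro j c dur p1 hj hd hc1 hc2 hinv
    have hlen : j + 1 < xs.length := by
      by_contra h
      rw [List.drop_eq_nil_iff.mpr (by omega)] at hd
      simp at hd
    have hy : xs.getD (j + 1) 0 = y := by
      have h1 : (xs.drop (j + 1))[0]'(by rw [hd]; simp) = y := by simp [hd]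
      rw [List.getElem_drop] at h1
      rw [List.getD_eq_getElem _ _ hlen]
      simpa using h1
    have hd' : xs.drop (j + 2) = ds := by
      have : (xs.drop (j + 1)).drop 1 = ds := by rw [hd]; simp
      simpa [List.drop_drop] using this
    have hr : PySem.List.pyRange (j : Int) ((xs.length - 1 : Nat) : Int) 1
        = (j : Int) :: PySem.List.pyRange ((j : Int) + 1) ((xs.length - 1 : Nat) : Int) 1 :=
      PySem.List.pyRange_one_cons (by omega)
    have hcast : ((j : Int) + 1) = (((j + 1 : Nat)) : Int) := by push_cast; ring
    simp only [hr, List.foldl_cons]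
    by_cases hcons : xs.getD j 0 + 1 = y
    · -- consecutive: extend the run
      have hstep : hwStepA xs m (c, dur, p1) (j : Int) = (c + 1, dur, p1) := by
        simp only [hwStepA, hcast, PySem.List.pyGetD_natCast]
        rw [hy, if_pos hcons]
      rw [hstep, hcast]
      have hIH := ih (j + 1) (c + 1) dur p1 hlen hd' (by omega) (by push_cast; omega)
        (by
          intro t ht
          rcases Nat.eq_zero_or_pos t with h0 | h0
          · rw [h0]; simp
          · have ht1 : ((t - 1 : Nat) : Int) < c := by omega
            have h2 := hinv (t - 1) ht1
            have he : j + 1 - t = j - (t - 1) := by omega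
            rw [he, h2, hy]
            have h3 : xs.getD j 0 = y - 1 := by omega
            rw [h3]; omega)
      rw [hIH, hy]
      have hR : hwRec m (xs.getD j 0) c (dur, p1) (y :: ds)
          = hwRec m y (c + 1) (dur, p1) ds := by
        rw [hwRec, if_pos hcons]
      rw [hR]
    · -- run break: record (maybe) and reset
      have hidx : (j : Int) - c + 1 = (((j + 1 - c.toNat : Nat)) : Int) := by omega
      have hsv : xs.getD (j + 1 - c.toNat) 0 = xs.getD j 0 - c + 1 := by
        have h2 := hinv (c - 1).toNat (by omega)
        have he : j - (c - 1).toNat = j + 1 - c.toNat := by omega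
        rw [he] at h2; rw [h2]; omega
      have hstep : hwStepA xs m (c, dur, p1) (j : Int)
          = (1, hwAccept m (dur, p1) (xs.getD j 0 - c + 1, c)) := by
        simp only [hwStepA, hcast, hidx, PySem.List.pyGetD_natCast]
        rw [hy, if_neg hcons, hsv]
        exact congrArg _ (hwStepA_break_eq_accept m c dur p1 _)
      rw [hstep, hcast]
      have hIH := ih (j + 1) 1 (hwAccept m (dur, p1) (xs.getD j 0 - c + 1, c)).1
        (hwAccept m (dur, p1) (xs.getD j 0 - c + 1, c)).2 hlen hd' (by omega)
        (by push_cast; omega) (by intro t ht; rw [show t = 0 by omega]; simp)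
      simp only [Prod.mk.eta] at hIH
      rw [hIH, hy]
      have hR : hwRec m (xs.getD j 0) c (dur, p1) (y :: ds)
          = hwRec m y 1 (hwAccept m (dur, p1) (xs.getD j 0 - c + 1, c)) ds := by
        rw [hwRec, if_neg hcons]
      rw [hR]

-- ===== VERDICT (by name: the statement is the Claim_ definition above) =====
theorem duration_heat_waves_spec : Claim_equal_duration_heat_waves := by
  intro pos_hw m _
  unfold Spec_duration_heat_waves
  cases pos_hw with
  | nil => rfl
  | cons x ys =>
    have hb : duration_heat_waves_alt (x :: ys) m
        = (hwRuns x 1 ys).foldl (hwAccept m) ([], []) := by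
      show ((ys.foldl hwRunStep (hwRunStep ([], none) x)).1).foldl (hwAccept m) ([], []) = _
      have h0 : hwRunStep ([], none) x = (([] : List (Int × Int)), some (x, 1)) := rfl
      rw [h0, hwRunStep_foldl]
      simp
    have hlen : ((PySem.List.slice (x :: ys) none (some (-1))).length : Int)
        = (((x :: ys).length - 1 : Nat) : Int) := by
      rw [PySem.List.slice_to_neg_one]
      simp
    have ha := hwStepA_foldl (x :: ys) m ys 0 1 [] [] (by simp) (by simp) le_rfl (by simp)
      (by intro t ht; rw [show t = 0 by omega]; simp)
    simp only [Nat.cast_zero] at ha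
    unfold duration_heat_waves
    rw [hlen]
    rw [ha, hb, hwRec_eq_foldl]
    norm_num
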